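-- pv_equiv track=rewrite | github.com/shack/synth | synth/brahma.py | _product_sum_bounded
-- ===== SOURCE A (Python) =====
-- def _product_sum_bounded(bounds, lower, upper):
--     L = len(bounds)
--     def p(n, curr, curr_sum):
--         if n == L:
--             yield curr
--         else:
--             for i in range(bounds[n] + 1):
--                 s = curr_sum + i
--                 if lower <= s and s <= upper:
--                     yield from p(n + 1, curr + [ i ], s)
--     return p(0, [], 0)
-- ===== SOURCE B (Python) =====
-- def _product_sum_bounded(bounds, lower, upper):
--     # Breadth-first: expand a frontier of (tuple, prefix_sum) level by level.
--     frontier = [([], 0)]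
--     for b in bounds:
--         frontier = [(curr + [i], s + i)
--                     for curr, s in frontier
--                     for i in range(b + 1)
--                     if lower <= s + i <= upper]
--     return (curr for curr, _ in frontier)
-- ===== Notes on version B (the rewrite author's own statement) =====
-- stated objective: alternative
-- what changed: Replaces the recursive depth-first generator with an iterative breadth-first fold that expands a whole frontier of (prefix, sum) pairs per bound; the order of fully expanded prefixes coincides with the DFS preorder.
import Mathlib
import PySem

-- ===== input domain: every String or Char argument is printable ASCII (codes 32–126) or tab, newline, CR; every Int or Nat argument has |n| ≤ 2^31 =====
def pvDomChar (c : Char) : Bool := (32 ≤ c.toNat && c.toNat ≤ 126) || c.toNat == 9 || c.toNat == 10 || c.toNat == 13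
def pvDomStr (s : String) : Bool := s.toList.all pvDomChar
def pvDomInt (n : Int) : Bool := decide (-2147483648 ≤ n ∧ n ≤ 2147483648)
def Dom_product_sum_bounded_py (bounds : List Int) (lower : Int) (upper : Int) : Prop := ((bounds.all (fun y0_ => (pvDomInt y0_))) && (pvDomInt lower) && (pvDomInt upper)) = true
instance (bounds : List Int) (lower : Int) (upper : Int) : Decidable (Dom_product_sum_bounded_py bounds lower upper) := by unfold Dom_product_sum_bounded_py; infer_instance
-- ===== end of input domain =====

-- B replaces A's recursive depth-first generator by an iterative breadth-first fold over the
-- bounds; both enumerate the same tuples in the same order (return-value equivalence; both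
-- Pythons are lazy generators, materialised as lists here).

-- ===== PORT A =====
-- A's inner generator p(n, curr, curr_sum): recursion on the suffix bounds[n:]
-- (n == L ↔ suffix empty, bounds[n] ↔ head of the suffix); 'yield from' accumulates by append.
def pA (lower : Int) (upper : Int) : List Int → List Int → Int → List (List Int)
  | [], curr, _ => [curr]
  | b :: rest, curr, curr_sum =>
      (PySem.List.pyRange 0 (b + 1) 1).foldl
        (fun acc i =>
          let s := curr_sum + i
          if lower ≤ s ∧ s ≤ upper then acc ++ pA lower upper rest (curr ++ [i]) s else acc)
        []

def product_sum_bounded_py (bounds : List Int) (lower : Int) (upper : Int) : List (List Int) :=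
  pA lower upper bounds [] 0

-- ===== PORT B =====
-- one level of the frontier expansion (the list comprehension's body for one bound b)
def pvStep (lower : Int) (upper : Int) (frontier : List (List Int × Int)) (b : Int) :
    List (List Int × Int) :=
  frontier.flatMap (fun cs =>
    (PySem.List.pyRange 0 (b + 1) 1).filterMap (fun i =>
      if lower ≤ cs.2 + i ∧ cs.2 + i ≤ upper then some (cs.1 ++ [i], cs.2 + i) else none))

def product_sum_bounded_py_alt (bounds : List Int) (lower : Int) (upper : Int) : List (List Int) :=
  (bounds.foldl (pvStep lower upper) [([], 0)]).map Prod.fst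

-- ===== PRECONDITION & SPEC =====
def Spec_product_sum_bounded_py (bounds : List Int) (lower : Int) (upper : Int) (out : List (List Int)) : Prop := out = product_sum_bounded_py_alt bounds lower upper
instance (bounds : List Int) (lower : Int) (upper : Int) (out : List (List Int)) : Decidable (Spec_product_sum_bounded_py bounds lower upper out) := by unfold Spec_product_sum_bounded_py; infer_instance

-- ===== CLAIM (what is proved, stated in full; the proofs are below) =====
def Claim_equal_product_sum_bounded_py : Prop := ∀ (bounds : List Int) (lower : Int) (upper : Int), Dom_product_sum_bounded_py bounds lower upper → Spec_product_sum_bounded_py bounds lower upper (product_sum_bounded_py bounds lower upper)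

-- ===== LEMMAS AND PROOFS =====

-- a conditional-append foldl is an accumulator ++ flatMap of the filterMap of the same list
theorem foldl_if_append {α β : Type} (P : α → Prop) [DecidablePred P] (f : α → β)
    (g : β → List (List Int)) (is : List α) (A : List (List Int)) :
    is.foldl (fun acc i => if P i then acc ++ g (f i) else acc) A
      = A ++ (is.filterMap (fun i => if P i then some (f i) else none)).flatMap g := by
  induction is generalizing A with
  | nil => simp
  | cons i is ih =>
      by_cases h : P i <;> simp [List.foldl_cons, h, ih, List.flatMap_cons]

-- BFS frontier vs DFS: folding the step over 'rest' from any frontier F and projecting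
-- equals concatenating A's DFS results from each frame of F
theorem frontier_eq_dfs (lower upper : Int) (rest : List Int) :
    ∀ (F : List (List Int × Int)),
      (rest.foldl (pvStep lower upper) F).map Prod.fst
        = F.flatMap (fun cs => pA lower upper rest cs.1 cs.2) := by
  induction rest with
  | nil =>
      intro F
      simp [pA]
      induction F with
      | nil => simp
      | cons c F ih => simp [List.flatMap_cons, ih]
  | cons b rest ih =>
      intro F
      rw [List.foldl_cons, ih, pvStep, List.flatMap_assoc]
      apply List.flatMap_congr
      intro cs _
      rw [show (pA lower upper (b :: rest) cs.1 cs.2)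
            = (PySem.List.pyRange 0 (b + 1) 1).foldl
                (fun acc i => if lower ≤ cs.2 + i ∧ cs.2 + i ≤ upper
                  then acc ++ pA lower upper rest (cs.1 ++ [i]) (cs.2 + i) else acc) [] from rfl]
      rw [foldl_if_append (fun i => lower ≤ cs.2 + i ∧ cs.2 + i ≤ upper)
            (fun i => (cs.1 ++ [i], cs.2 + i))
            (fun cs' => pA lower upper rest cs'.1 cs'.2)]
      simp

-- ===== VERDICT (by name: the statement is the Claim_ definition above) =====
theorem product_sum_bounded_py_spec : Claim_equal_product_sum_bounded_py := by
  intro bounds lower upper _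
  unfold Spec_product_sum_bounded_py product_sum_bounded_py product_sum_bounded_py_alt
  rw [frontier_eq_dfs]
  simp
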